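-- pv_equiv track=rewrite | github.com/VijayanThanusan/NeuralMusic | models/classicalSong.hdf5/lstm_model-20190809170412.py | harmonizerLoop
-- ===== SOURCE A (Python) =====
-- def harmonizerLoop(arrayToHarmonize,NbOfMaxActivatedNotes):
--     NbOfMaxActivatedNotesToDecrease = NbOfMaxActivatedNotes
--     generateNewArray = []
--     for x in arrayToHarmonize:
--         if (x > 0 and NbOfMaxActivatedNotesToDecrease > 0):
--             generateNewArray.append(x)
--             NbOfMaxActivatedNotesToDecrease -= 1
--         else:
--             generateNewArray.append(0)
--     return generateNewArray
-- ===== SOURCE B (Python) =====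
-- def harmonizerLoop(arrayToHarmonize, NbOfMaxActivatedNotes):
--     # Pass 1: inclusive running count of positive entries at each position.
--     counts = []
--     seen = 0
--     for x in arrayToHarmonize:
--         if x > 0:
--             seen += 1
--         counts.append(seen)
--     # Pass 2: keep a positive entry iff its inclusive count is within the budget.
--     return [x if x > 0 and c <= NbOfMaxActivatedNotes else 0
--             for x, c in zip(arrayToHarmonize, counts)]
-- ===== Notes on version B (the rewrite author's own statement) =====
-- stated objective: alternative
-- what changed: Replaces A's single budget-decrementing loop by a two-pass structure: first build an inclusive prefix-count table of positive entries, then rebuild the list keeping x exactly when x > 0 and its prefix count is <= the budget.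
import Mathlib
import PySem

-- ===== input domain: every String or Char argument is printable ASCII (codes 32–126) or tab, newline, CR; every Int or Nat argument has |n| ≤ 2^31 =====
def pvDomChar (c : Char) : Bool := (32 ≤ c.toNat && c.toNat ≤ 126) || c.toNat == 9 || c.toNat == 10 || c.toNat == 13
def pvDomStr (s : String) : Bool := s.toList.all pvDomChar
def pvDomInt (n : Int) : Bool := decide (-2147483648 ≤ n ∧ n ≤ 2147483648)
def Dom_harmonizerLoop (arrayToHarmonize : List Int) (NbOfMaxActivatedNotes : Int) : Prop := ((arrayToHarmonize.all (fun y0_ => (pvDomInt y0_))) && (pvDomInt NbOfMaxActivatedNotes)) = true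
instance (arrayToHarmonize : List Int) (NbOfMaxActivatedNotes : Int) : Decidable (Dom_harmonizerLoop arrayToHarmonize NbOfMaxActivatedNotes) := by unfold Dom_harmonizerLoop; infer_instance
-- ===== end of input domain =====

-- B replaces A's single budget-decrementing loop with a two-pass structure
-- (inclusive prefix-count table of positives, then a rebuild pass); alternative, same cost.


-- ===== PORT A =====
-- A's loop: walk the list with the remaining budget, keep x while budget > 0, else 0.
def harmonizerLoopGo : List Int → Int → List Int
  | [], _ => []
  | x :: xs, b =>
    if x > 0 ∧ b > 0 then x :: harmonizerLoopGo xs (b - 1)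
    else 0 :: harmonizerLoopGo xs b

def harmonizerLoop (arrayToHarmonize : List Int) (NbOfMaxActivatedNotes : Int) : List Int :=
  harmonizerLoopGo arrayToHarmonize NbOfMaxActivatedNotes

-- ===== PORT B =====
-- Pass 1 of Source B: inclusive running count of positive entries (starting from s).
def posCounts : List Int → Int → List Int
  | [], _ => []
  | x :: xs, s =>
    let s' := if x > 0 then s + 1 else s
    s' :: posCounts xs s'

def harmonizerLoop_alt (arrayToHarmonize : List Int) (NbOfMaxActivatedNotes : Int) : List Int :=
  (arrayToHarmonize.zip (posCounts arrayToHarmonize 0)).map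
    (fun p => if p.1 > 0 ∧ p.2 ≤ NbOfMaxActivatedNotes then p.1 else 0)

-- ===== PRECONDITION & SPEC =====
def Spec_harmonizerLoop (arrayToHarmonize : List Int) (NbOfMaxActivatedNotes : Int) (out : List Int) : Prop := out = harmonizerLoop_alt arrayToHarmonize NbOfMaxActivatedNotes
instance (arrayToHarmonize : List Int) (NbOfMaxActivatedNotes : Int) (out : List Int) : Decidable (Spec_harmonizerLoop arrayToHarmonize NbOfMaxActivatedNotes out) := by unfold Spec_harmonizerLoop; infer_instance

-- ===== CLAIM (what is proved, stated in full; the proofs are below) =====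
def Claim_equal_harmonizerLoop : Prop := ∀ (arrayToHarmonize : List Int) (NbOfMaxActivatedNotes : Int), Dom_harmonizerLoop arrayToHarmonize NbOfMaxActivatedNotes → Spec_harmonizerLoop arrayToHarmonize NbOfMaxActivatedNotes (harmonizerLoop arrayToHarmonize NbOfMaxActivatedNotes)

-- ===== LEMMAS AND PROOFS =====

-- When the threshold t is at most the starting count s, B's rebuild pass zeroes everything:
-- a positive entry's inclusive count is ≥ s + 1 > t, a non-positive entry is zeroed anyway.
lemma posCounts_zeros (xs : List Int) (s t : Int) (h : t ≤ s) :
    (xs.zip (posCounts xs s)).map (fun p => if p.1 > 0 ∧ p.2 ≤ t then p.1 else 0)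
      = xs.map (fun _ => 0) := by
  induction xs generalizing s with
  | nil => rfl
  | cons x xs ih =>
    simp only [posCounts, List.zip_cons_cons, List.map]
    by_cases hx : x > 0
    · simp only [hx, if_true]
      rw [if_neg (by omega), ih (s + 1) (by omega)]
    · simp only [hx, if_false]
      rw [if_neg (by tauto), ih s h]

-- The core invariant relating A's budget b (with counts started at s) to B's threshold s + b.
lemma go_eq_counts (xs : List Int) (b s : Int) :
    harmonizerLoopGo xs b
      = (xs.zip (posCounts xs s)).map (fun p => if p.1 > 0 ∧ p.2 ≤ s + b then p.1 else 0) := by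
  induction xs generalizing b s with
  | nil => rfl
  | cons x xs ih =>
    simp only [harmonizerLoopGo, posCounts, List.zip_cons_cons, List.map]
    by_cases hx : x > 0
    · by_cases hb : b > 0
      · rw [if_pos ⟨hx, hb⟩]
        simp only [if_pos hx]
        rw [if_pos ⟨hx, by omega⟩]
        have heq : s + 1 + (b - 1) = s + b := by omega
        rw [ih (b - 1) (s + 1), heq]
      · rw [if_neg (by tauto)]
        simp only [if_pos hx]
        rw [if_neg (by intro h; exact hb (by omega))]
        rw [ih b (s + 1), posCounts_zeros xs (s + 1) (s + 1 + b) (by omega),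
            posCounts_zeros xs (s + 1) (s + b) (by omega)]
    · rw [if_neg (by tauto)]
      simp only [if_neg hx]
      rw [if_neg (by tauto)]
      rw [ih b s]

-- ===== VERDICT (by name: the statement is the Claim_ definition above) =====
theorem harmonizerLoop_spec : Claim_equal_harmonizerLoop := by
  intro xs n _
  show harmonizerLoop xs n = harmonizerLoop_alt xs n
  unfold harmonizerLoop harmonizerLoop_alt
  simpa using go_eq_counts xs n 0
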